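-- pv_equiv track=rewrite | github.com/ayeletc/MSGT | Markov_model.py | find_matching_states_to_obs
-- ===== SOURCE A (Python) =====
-- def find_matching_states_to_obs(obs):
--     possible_states = ['']
--     for idx, s in enumerate(obs):
--         if s != 2:
--             possible_states = [ps+str(obs[idx]) for ps in possible_states]
--         else:
--             new_possible_states = []
--             for ps in possible_states:
--                 new_possible_states.append(ps+'0')
--                 new_possible_states.append(ps+'1')
--             possible_states = new_possible_states
--     return possible_states
-- ===== SOURCE B (Python) =====
-- def find_matching_states_to_obs(obs):
--     k = sum(1 for s in obs if s == 2)
--     out = []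
--     for m in range(2 ** k):
--         b = k
--         chars = []
--         for s in obs:
--             if s != 2:
--                 chars.append(str(s))
--             else:
--                 b -= 1
--                 chars.append(str((m >> b) & 1))
--         out.append(''.join(chars))
--     return out
-- ===== Notes on version B (the rewrite author's own statement) =====
-- stated objective: faster
-- what changed: Instead of growing a list of partial prefix strings symbol by symbol (recopying every partial string at each position), B counts the wildcards once, then enumerates the 2^k bitmasks and decodes each mask into a full string in a single pass over obs with one join (leftmost wildcard = MSB), reproducing A's exact output order.
import Mathlib
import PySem

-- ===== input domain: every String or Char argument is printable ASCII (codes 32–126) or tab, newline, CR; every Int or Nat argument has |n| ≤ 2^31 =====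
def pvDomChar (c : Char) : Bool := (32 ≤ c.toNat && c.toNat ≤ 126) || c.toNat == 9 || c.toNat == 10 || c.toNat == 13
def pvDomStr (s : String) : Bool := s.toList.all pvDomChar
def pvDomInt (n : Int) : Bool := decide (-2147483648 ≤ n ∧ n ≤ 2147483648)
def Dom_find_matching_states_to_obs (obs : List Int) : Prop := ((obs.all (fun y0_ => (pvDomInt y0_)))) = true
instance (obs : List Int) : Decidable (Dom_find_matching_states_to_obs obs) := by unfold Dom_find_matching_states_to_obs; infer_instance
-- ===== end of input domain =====

-- B replaces A's incremental prefix-list expansion by counting the wildcards once and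
-- decoding each of the 2^k bitmasks into a full string in one pass (measured faster:
-- A recopies every partial string at each position, B materialises each output once).

-- ===== PORT A =====
-- A: possible_states = ['']; for idx, s in enumerate(obs): rebuild possible_states.
-- 'str(obs[idx])' is ported as 'PySem.Int.toStr p.2': by enumerate, obs[idx] is exactly s (= p.2).
def find_matching_states_to_obs (obs : List Int) : List String :=
  (PySem.List.enumerate obs).foldl
    (fun possible_states p =>
      if p.2 ≠ 2 then
        possible_states.map (fun ps => ps ++ PySem.Int.toStr p.2)
      else
        possible_states.foldl
          (fun new_possible_states ps =>
            (new_possible_states ++ [ps ++ "0"]) ++ [ps ++ "1"]) [])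
    [""]

-- ===== PORT B =====
-- B: k = number of wildcards; for each mask m in range(2**k), one pass over obs emits
-- str(s) at fixed positions and str((m >> b) & 1) at wildcards (b decremented first).
-- The counter k, the masks m and the shift amounts b are nonnegative Python ints, ported as Nat.
def find_matching_states_to_obs_alt (obs : List Int) : List String :=
  let k : Nat := obs.foldl (fun a s => if s == 2 then a + 1 else a) 0
  (List.range (2 ^ k)).map (fun m =>
    PySem.Str.join ""
      ((obs.foldl
        (fun (acc : Nat × List String) s =>
          if s ≠ 2 then (acc.1, acc.2 ++ [PySem.Int.toStr s])
          else (acc.1 - 1, acc.2 ++ [PySem.Int.toStr (((m >>> (acc.1 - 1)) &&& 1 : Nat) : Int)]))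
        (k, [])).2))

-- ===== PRECONDITION & SPEC =====
def Spec_find_matching_states_to_obs (obs : List Int) (out : List String) : Prop := out = find_matching_states_to_obs_alt obs
instance (obs : List Int) (out : List String) : Decidable (Spec_find_matching_states_to_obs obs out) := by unfold Spec_find_matching_states_to_obs; infer_instance

-- ===== CLAIM (what is proved, stated in full; the proofs are below) =====
def Claim_equal_find_matching_states_to_obs : Prop := ∀ (obs : List Int), Dom_find_matching_states_to_obs obs → Spec_find_matching_states_to_obs obs (find_matching_states_to_obs obs)

-- ===== LEMMAS AND PROOFS =====

-- common recursive characterisation both ports are reduced to (proof helper)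
def expandRec : List Int → List String
  | [] => [""]
  | s :: rest =>
    (if s == 2 then ["0", "1"] else [PySem.Int.toStr s]).flatMap
      (fun h => (expandRec rest).map (fun t => h ++ t))

-- ---- A-side ----

-- A's whole loop, started from any accumulated list ps, prepends every member of ps
-- to every expansion of the remaining observation.
theorem find_matching_loop_eq (obs : List Int) (ps : List String) :
    obs.foldl
      (fun possible_states s =>
        if s ≠ 2 then
          possible_states.map (fun q => q ++ PySem.Int.toStr s)
        else
          possible_states.foldl
            (fun new_possible_states q =>
              (new_possible_states ++ [q ++ "0"]) ++ [q ++ "1"]) []) ps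
    = ps.flatMap (fun q => (expandRec obs).map (fun t => q ++ t)) := by
  induction obs generalizing ps with
  | nil =>
      simp [expandRec, String.append_empty, List.flatMap_singleton']
  | cons s rest ih =>
      simp only [List.foldl_cons]
      by_cases hs : s = 2
      · subst hs
        have hstep : ∀ (acc : List String),
            acc.foldl (fun n q => (n ++ [q ++ "0"]) ++ [q ++ "1"]) []
              = acc.flatMap (fun q => [q ++ "0", q ++ "1"]) := by
          intro acc
          have := PySem.List.foldl_append_eq_flatMap
            (g := fun q => [q ++ "0", q ++ "1"]) (l := acc) (acc := ([] : List String))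
          simpa using this
        rw [if_neg (by simp), hstep, ih]
        simp [expandRec, List.flatMap_assoc, String.append_assoc, Function.comp_def]
      · rw [if_pos hs, ih]
        simp [expandRec, hs, List.flatMap_map, Function.comp_def, String.append_assoc]

theorem a_eq_expandRec (obs : List Int) :
    find_matching_states_to_obs obs = expandRec obs := by
  unfold find_matching_states_to_obs
  have h : ((PySem.List.enumerate obs).map (·.2)).foldl
      (fun possible_states s =>
        if s ≠ 2 then possible_states.map (fun ps => ps ++ PySem.Int.toStr s)
        else possible_states.foldl
          (fun new_possible_states ps =>
            (new_possible_states ++ [ps ++ "0"]) ++ [ps ++ "1"]) []) [""]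
    = (PySem.List.enumerate obs).foldl
      (fun possible_states p =>
        if p.2 ≠ 2 then possible_states.map (fun ps => ps ++ PySem.Int.toStr p.2)
        else possible_states.foldl
          (fun new_possible_states ps =>
            (new_possible_states ++ [ps ++ "0"]) ++ [ps ++ "1"]) []) [""] :=
    by rw [List.foldl_map]
  rw [← h, PySem.List.map_snd_enumerate, find_matching_loop_eq]
  simp [String.empty_append]

-- ---- B-side ----

-- wildcard count of B's first loop
theorem count_fold (obs : List Int) (a : Nat) :
    obs.foldl (fun a s => if s == 2 then a + 1 else a) a
      = a + obs.countP (· == 2) := by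
  induction obs generalizing a with
  | nil => simp
  | cons s rest ih =>
      simp only [List.foldl_cons, List.countP_cons]
      by_cases hs : s = 2
      · rw [if_pos (by simp [hs]), ih]; simp [hs]; omega
      · rw [if_neg (by simp [hs]), ih]; simp [hs]

-- the list of characters B's inner loop emits for mask m with b wildcard bits left
def dec : List Int → Nat → Nat → List String
  | [], _, _ => []
  | s :: rest, m, b =>
    if s ≠ 2 then PySem.Int.toStr s :: dec rest m b
    else PySem.Int.toStr (((m >>> (b - 1)) &&& 1 : Nat) : Int) :: dec rest m (b - 1)

theorem dec_cons_wild (rest : List Int) (m b : Nat) :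
    dec (2 :: rest) m b
      = PySem.Int.toStr (((m >>> (b - 1)) &&& 1 : Nat) : Int) :: dec rest m (b - 1) := by
  simp [dec]

theorem dec_cons_fix (s : Int) (hs : s ≠ 2) (rest : List Int) (m b : Nat) :
    dec (s :: rest) m b = PySem.Int.toStr s :: dec rest m b := by
  simp [dec, hs]

theorem fold_dec (obs : List Int) (m : Nat) (b : Nat) (cs : List String) :
    obs.foldl
      (fun (acc : Nat × List String) s =>
        if s ≠ 2 then (acc.1, acc.2 ++ [PySem.Int.toStr s])
        else (acc.1 - 1, acc.2 ++ [PySem.Int.toStr (((m >>> (acc.1 - 1)) &&& 1 : Nat) : Int)]))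
      (b, cs)
    = (b - obs.countP (· == 2), cs ++ dec obs m b) := by
  induction obs generalizing b cs with
  | nil => simp [dec]
  | cons s rest ih =>
      simp only [List.foldl_cons, List.countP_cons]
      by_cases hs : s = 2
      · subst hs
        rw [if_neg (by simp), ih, dec_cons_wild]
        simp only [Prod.mk.injEq, List.append_assoc, List.singleton_append]
        constructor
        · simp; omega
        · trivial
      · rw [if_pos hs, ih, dec_cons_fix s hs]
        simp [hs]

-- bit i of m only depends on m modulo 2^b when i < b
theorem bit_congr (i b m m' : Nat) (hib : i < b) (h : m % 2 ^ b = m' % 2 ^ b) :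
    (m >>> i) &&& 1 = (m' >>> i) &&& 1 := by
  have key : ∀ n : Nat, (n >>> i) &&& 1 = ((n % 2 ^ b) >>> i) &&& 1 := by
    intro n
    obtain ⟨j, hj⟩ : ∃ j, b = i + j + 1 := ⟨b - i - 1, by omega⟩
    have h2b : 2 ^ b = 2 ^ i * (2 ^ j * 2) := by rw [hj]; ring
    simp only [Nat.and_one_is_mod, Nat.shiftRight_eq_div_pow]
    obtain ⟨q, r, hr, hn⟩ : ∃ q r, r < 2 ^ b ∧ n = 2 ^ b * q + r :=
      ⟨n / 2 ^ b, n % 2 ^ b, Nat.mod_lt _ (by positivity), (Nat.div_add_mod n (2 ^ b)).symm⟩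
    subst hn
    rw [Nat.mul_add_mod, Nat.mod_eq_of_lt hr]
    rw [h2b, Nat.mul_assoc, Nat.mul_add_div (by positivity)]
    rw [show 2 ^ j * 2 * q + r / 2 ^ i = r / 2 ^ i + 2 ^ j * q * 2 by ring]
    rw [Nat.add_mul_mod_self_right]
  rw [key m, key m', h]

-- dec only looks at the low b bits of the mask, provided there are at most b wildcards
theorem dec_congr (obs : List Int) (b m m' : Nat)
    (hc : obs.countP (· == 2) ≤ b) (h : m % 2 ^ b = m' % 2 ^ b) :
    dec obs m b = dec obs m' b := by
  induction obs generalizing b with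
  | nil => simp [dec]
  | cons s rest ih =>
      by_cases hs : s = 2
      · subst hs
        have hc2 : rest.countP (· == 2) + 1 ≤ b := by
          simpa [List.countP_cons] using hc
        have hmod : m % 2 ^ (b - 1) = m' % 2 ^ (b - 1) := by
          have hd : 2 ^ (b - 1) ∣ 2 ^ b := pow_dvd_pow 2 (by omega)
          rw [← Nat.mod_mod_of_dvd m hd, ← Nat.mod_mod_of_dvd m' hd, h]
        rw [dec_cons_wild, dec_cons_wild,
          bit_congr (b - 1) b m m' (by omega) h, ih (b - 1) (by omega) hmod]
      · have hc2 : rest.countP (· == 2) ≤ b := by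
          simpa [List.countP_cons, hs] using hc
        rw [dec_cons_fix s hs, dec_cons_fix s hs, ih b hc2 h]

theorem join_cons (a : String) (l : List String) :
    PySem.Str.join "" (a :: l) = a ++ PySem.Str.join "" l := by
  have h : ∀ (x : List Char) (ll : List (List Char)),
      ([] : List Char).intercalate (x :: ll) = x ++ ([] : List Char).intercalate ll := by
    intro x ll; cases ll <;> simp [List.intercalate]
  simp [PySem.Str.join, PySem.Chars.join, h, String.ofList_append]

theorem dec_main (obs : List Int) :
    (List.range (2 ^ obs.countP (· == 2))).map
        (fun m => PySem.Str.join "" (dec obs m (obs.countP (· == 2))))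
      = expandRec obs := by
  induction obs with
  | nil => simp [dec, expandRec]; decide
  | cons s rest ih =>
      by_cases hs : s = 2
      · subst hs
        set k := rest.countP (· == 2) with hk
        have hcount : (((2 : Int) :: rest).countP (· == 2)) = k + 1 := by
          simp [hk]
        rw [hcount]
        have hpow : 2 ^ (k + 1) = 2 ^ k + 2 ^ k := by ring
        rw [hpow, List.range_add, List.map_append, List.map_map]
        have h0 : (List.range (2 ^ k)).map
            (fun m => PySem.Str.join "" (dec ((2 : Int) :: rest) m (k + 1)))
          = (List.range (2 ^ k)).map (fun m => "0" ++ PySem.Str.join "" (dec rest m k)) := by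
          apply List.map_congr_left
          intro m hm
          rw [List.mem_range] at hm
          have hsh : m >>> k = 0 := by
            rw [Nat.shiftRight_eq_div_pow]; exact Nat.div_eq_of_lt hm
          rw [dec_cons_wild, Nat.add_sub_cancel, hsh, join_cons]
          try congr 1
          try decide
        have h1 : (List.range (2 ^ k)).map
            ((fun m => PySem.Str.join "" (dec ((2 : Int) :: rest) m (k + 1))) ∘ (fun x => 2 ^ k + x))
          = (List.range (2 ^ k)).map (fun j => "1" ++ PySem.Str.join "" (dec rest j k)) := by
          apply List.map_congr_left
          intro j hj
          rw [List.mem_range] at hj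
          have hsh : (2 ^ k + j) >>> k = 1 := by
            rw [Nat.shiftRight_eq_div_pow, Nat.add_comm,
                Nat.add_div_right j (by positivity), Nat.div_eq_of_lt hj]
          have hdc : dec rest (2 ^ k + j) k = dec rest j k := by
            apply dec_congr rest k _ _ (le_refl _)
            rw [Nat.add_mod_left]
          simp only [Function.comp_apply]
          rw [dec_cons_wild, Nat.add_sub_cancel, hsh, hdc, join_cons]
          try congr 1
          try decide
        rw [h0, h1]
        have ih0 := congrArg (List.map (fun t => "0" ++ t)) ih
        have ih1 := congrArg (List.map (fun t => "1" ++ t)) ih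
        rw [List.map_map] at ih0 ih1
        rw [show (fun m => "0" ++ PySem.Str.join "" (dec rest m k))
              = ((fun t => "0" ++ t) ∘ fun m => PySem.Str.join "" (dec rest m k)) from rfl, ih0]
        rw [show (fun j => "1" ++ PySem.Str.join "" (dec rest j k))
              = ((fun t => "1" ++ t) ∘ fun m => PySem.Str.join "" (dec rest m k)) from rfl, ih1]
        simp [expandRec]
      · set k := rest.countP (· == 2) with hk
        have hcount : ((s :: rest).countP (· == 2)) = k := by
          simp [hs, hk]
        rw [hcount]
        have h : (List.range (2 ^ k)).map
            (fun m => PySem.Str.join "" (dec (s :: rest) m k))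
          = (List.range (2 ^ k)).map
            ((fun t => PySem.Int.toStr s ++ t) ∘ fun m => PySem.Str.join "" (dec rest m k)) := by
          apply List.map_congr_left
          intro m _
          simp only [Function.comp_apply]
          rw [dec_cons_fix s hs, join_cons]
        rw [h, ← List.map_map, ih]
        simp [expandRec, hs]

theorem b_eq_expandRec (obs : List Int) :
    find_matching_states_to_obs_alt obs = expandRec obs := by
  unfold find_matching_states_to_obs_alt
  rw [count_fold, Nat.zero_add, ← dec_main obs]
  apply List.map_congr_left
  intro m _
  rw [fold_dec]
  simp

-- ===== VERDICT (by name: the statement is the Claim_ definition above) =====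
theorem find_matching_states_to_obs_spec : Claim_equal_find_matching_states_to_obs := by
  intro obs _
  unfold Spec_find_matching_states_to_obs
  rw [a_eq_expandRec, b_eq_expandRec]
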